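-- pv_equiv track=rewrite | github.com/mongodb/mongo | src/third_party/zstandard/zstd/tests/test-license.py | valid_license
-- ===== SOURCE A (Python) =====
-- LICENSE_LINES = [
--     "This source code is licensed under both the BSD-style license (found in the",
--     "LICENSE file in the root directory of this source tree) and the GPLv2 (found",
--     "in the COPYING file in the root directory of this source tree).",
--     "You may select, at your option, one of the above-listed licenses.",
-- ]
--
-- def valid_license(lines):
--     for b in range(len(lines)):
--         if LICENSE_LINES[0] not in lines[b]:
--             continue
--         for l in range(len(LICENSE_LINES)):
--             if LICENSE_LINES[l] not in lines[b + l]: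
--                 message = f"""Invalid license line found starting on line {b + l}!
-- Expected: '{LICENSE_LINES[l]}'
-- Actual: '{lines[b + l]}'"""
--                 return (False, message)
--         return (True, "")
--     return (False, "License not found!")
-- ===== SOURCE B (Python) =====
-- LICENSE_LINES = [
--     "This source code is licensed under both the BSD-style license (found in the",
--     "LICENSE file in the root directory of this source tree) and the GPLv2 (found",
--     "in the COPYING file in the root directory of this source tree).",
--     "You may select, at your option, one of the above-listed licenses.",
-- ]
--
-- def valid_license(lines):
--     # Single forward pass with a state accumulator: l is None while searching,
--     # and the index of the next expected license line once the header is seen.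
--     # No random access into lines at all.
--     l = None
--     for i, line in enumerate(lines):
--         if l is None and LICENSE_LINES[0] in line:
--             l = 0
--         if l is not None:
--             if LICENSE_LINES[l] not in line:
--                 message = f"""Invalid license line found starting on line {i}!
-- Expected: '{LICENSE_LINES[l]}'
-- Actual: '{line}'"""
--                 return (False, message)
--             l += 1
--             if l == len(LICENSE_LINES):
--                 return (True, "")
--     return (False, "License not found!")
-- ===== Notes on version B (the rewrite author's own statement) =====
-- stated objective: alternative
-- what changed: Replaced A's nested loop with random-access lookahead (outer scan over b, inner re-check reading lines[b+l]) by a single forward pass over the lines carrying a state accumulator (None while searching, else the next expected LICENSE_LINES offset), which never indexes into lines.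
import Mathlib
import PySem

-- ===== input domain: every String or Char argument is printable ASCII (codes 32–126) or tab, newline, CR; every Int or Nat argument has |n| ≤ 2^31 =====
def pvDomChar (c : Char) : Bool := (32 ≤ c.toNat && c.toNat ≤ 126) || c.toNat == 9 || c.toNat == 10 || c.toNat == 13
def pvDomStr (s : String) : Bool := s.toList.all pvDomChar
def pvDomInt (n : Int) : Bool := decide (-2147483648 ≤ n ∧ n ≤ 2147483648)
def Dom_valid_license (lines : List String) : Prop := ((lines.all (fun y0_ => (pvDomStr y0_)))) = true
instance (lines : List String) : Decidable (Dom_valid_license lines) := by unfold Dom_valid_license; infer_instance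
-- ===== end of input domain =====

-- B replaces A's nested loop with random-access lookahead (lines[b + l]) by a single
-- forward pass carrying a state accumulator (None / next expected offset), never
-- indexing into lines (objective: alternative).

-- shared module-level constant LICENSE_LINES (identical in Source A and Source B)
def pvLicLines : List String :=
  ["This source code is licensed under both the BSD-style license (found in the",
   "LICENSE file in the root directory of this source tree) and the GPLv2 (found",
   "in the COPYING file in the root directory of this source tree).",
   "You may select, at your option, one of the above-listed licenses."]

-- LICENSE_LINES[0]
def pvL0 : String := PySem.List.pyGetD pvLicLines 0 ""

-- the f-string message (identical in both Pythons)
def pvMsg (i : Int) (exp act : String) : String :=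
  "Invalid license line found starting on line " ++ PySem.Int.toStr i ++ "!\nExpected: '" ++
    exp ++ "'\nActual: '" ++ act ++ "'"

-- ===== PORT A =====
-- inner loop 'for l in range(len(LICENSE_LINES))'; lines[b+l] is PySem.List.pyGetD —
-- Python's IndexError there is excluded by Pre_valid_license
def pvInnerA (lines : List String) (b : Nat) : Nat → List String → Bool × String
  | _, [] => (true, "")
  | l, exp :: rest =>
    let act := PySem.List.pyGetD lines ((b + l : Nat) : Int) ""
    if PySem.Str.isIn exp act then pvInnerA lines b (l + 1) rest
    else (false, pvMsg ((b + l : Nat) : Int) exp act)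

-- outer loop 'for b in range(len(lines))' (cur = lines[b])
def pvOuterA (lines : List String) : Nat → List String → Bool × String
  | _, [] => (false, "License not found!")
  | b, cur :: rest =>
    if PySem.Str.isIn pvL0 cur then pvInnerA lines b 0 pvLicLines
    else pvOuterA lines (b + 1) rest

def valid_license (lines : List String) : Bool × String := pvOuterA lines 0 lines

-- ===== PORT B =====
-- Source B's single pass: i the enumerate counter, st the state l (none = still searching,
-- some l = next expected LICENSE_LINES offset); each line is consumed exactly once
def pvScanB : Nat → Option Nat → List String → Bool × String
  | _, _, [] => (false, "License not found!")
  | i, st, line :: rest =>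
    let st' : Option Nat :=
      match st with
      | none => if PySem.Str.isIn pvL0 line then some 0 else none
      | some l => some l
    match st' with
    | none => pvScanB (i + 1) none rest
    | some l =>
      if PySem.Str.isIn (PySem.List.pyGetD pvLicLines (l : Int) "") line then
        if l + 1 == 4 then (true, "")
        else pvScanB (i + 1) (some (l + 1)) rest
      else (false, pvMsg (i : Int) (PySem.List.pyGetD pvLicLines (l : Int) "") line)

def valid_license_alt (lines : List String) : Bool × String := pvScanB 0 none lines

-- ===== PRECONDITION & SPEC =====
-- Pre_ excludes exactly the inputs on which Python A raises IndexError: the block starting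
-- at the first line containing LICENSE_LINES[0] is truncated (fewer than 4 lines remain)
-- and every in-range line of it matches.
def Pre_valid_license (lines : List String) : Prop :=
  (match lines.findIdx? (fun s => PySem.Str.isIn pvL0 s) with
   | none => true
   | some b =>
     decide (b + 4 ≤ lines.length) ||
     (List.range 4).any (fun l =>
       decide (b + l < lines.length) &&
       !(PySem.Str.isIn (PySem.List.pyGetD pvLicLines (l : Int) "")
                        (PySem.List.pyGetD lines ((b + l : Nat) : Int) "")))) = true
instance (lines : List String) : Decidable (Pre_valid_license lines) := by
  unfold Pre_valid_license; infer_instance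

def pvWitness_valid_license : List String := ["no license here"]

def Spec_valid_license (lines : List String) (out : Bool × String) : Prop := out = valid_license_alt lines
instance (lines : List String) (out : Bool × String) : Decidable (Spec_valid_license lines out) := by unfold Spec_valid_license; infer_instance

-- ===== CLAIM (what is proved, stated in full; the proofs are below) =====
def Claim_equal_valid_license : Prop := ∀ (lines : List String), Dom_valid_license lines → Pre_valid_license lines → Spec_valid_license lines (valid_license lines)

-- ===== LEMMAS AND PROOFS =====

-- the 'A does not fall off the block at b' hypothesis, generalized to start offset l
def pvH (lines : List String) (b l : Nat) : Prop :=
  b + 4 ≤ lines.length ∨ ∃ l', l ≤ l' ∧ l' < 4 ∧ b + l' < lines.length ∧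
    PySem.Str.isIn (PySem.List.pyGetD pvLicLines (l' : Int) "")
                   (PySem.List.pyGetD lines ((b + l' : Nat) : Int) "") = false

theorem pvH_lt (lines : List String) (b l : Nat) (hl : l < 4) (h : pvH lines b l) :
    b + l < lines.length := by
  rcases h with h | ⟨l', h1, h2, h3, _⟩ <;> omega

-- locked phase: B's scan in state (some l) over the tail from b+l equals A's inner loop
theorem pvLocked (lines : List String) (b : Nat) :
    ∀ k l, l < 4 → 4 - l ≤ k → pvH lines b l →
      pvScanB (b + l) (some l) (lines.drop (b + l)) = pvInnerA lines b l (pvLicLines.drop l) := by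
  intro k
  induction k with
  | zero => intro l hl hk _; omega
  | succ k ih =>
    intro l hl _ hH
    have hbl : b + l < lines.length := pvH_lt lines b l hl hH
    have hlic : l < pvLicLines.length := by simp [pvLicLines]; omega
    have hline : lines.drop (b + l) = lines[b + l] :: lines.drop (b + l + 1) :=
      List.drop_eq_getElem_cons hbl
    have hexp : pvLicLines.drop l = pvLicLines[l] :: pvLicLines.drop (l + 1) :=
      List.drop_eq_getElem_cons hlic
    have hactA : PySem.List.pyGetD lines ((b + l : Nat) : Int) "" = lines[b + l] := by
      rw [PySem.List.pyGetD_natCast]; exact List.getD_eq_getElem _ _ hbl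
    have hexpA : PySem.List.pyGetD pvLicLines (l : Int) "" = pvLicLines[l] := by
      rw [PySem.List.pyGetD_natCast]; exact List.getD_eq_getElem _ _ hlic
    rw [hline, hexp]
    simp only [pvScanB, pvInnerA, hactA, hexpA]
    by_cases hc : PySem.Str.isIn pvLicLines[l] lines[b + l] = true
    · rw [if_pos hc, if_pos hc]
      by_cases h3 : l = 3
      · subst h3
        have hnil : pvLicLines.drop 4 = [] := by simp [pvLicLines]
        rw [hnil]
        simp [pvInnerA]
      · rw [show ((l + 1 == 4) : Bool) = false from beq_eq_false_iff_ne.mpr (by omega)]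
        simp only [Bool.false_eq_true, if_false]
        have hH' : pvH lines b (l + 1) := by
          rcases hH with h | ⟨l', h1, h2, h3', h5⟩
          · exact Or.inl h
          · refine Or.inr ⟨l', ?_, h2, h3', h5⟩
            rcases Nat.eq_or_lt_of_le h1 with rfl | h1'
            · rw [hexpA, hactA, hc] at h5
              exact absurd h5 (by simp)
            · omega
        have := ih (l + 1) (by omega) (by omega) hH'
        rw [show b + (l + 1) = b + l + 1 by omega] at this
        exact this
    · rw [if_neg hc, if_neg hc]

-- unlocked phase: B's searching pass from index b equals A's outer loop, given the
-- good-block hypothesis at the first match found in the remaining suffix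
theorem pvUnlocked (lines : List String) :
    ∀ rest b, lines.drop b = rest →
      (∀ j, rest.findIdx? (fun s => PySem.Str.isIn pvL0 s) = some j → pvH lines (b + j) 0) →
      pvScanB b none rest = pvOuterA lines b rest := by
  intro rest
  induction rest with
  | nil => intro b _ _; rfl
  | cons cur rest ih =>
    intro b hdrop hfind
    by_cases hp : PySem.Str.isIn pvL0 cur = true
    · -- lock at b: B's pass from none-state is the locked pass at l = 0
      have hH0 : pvH lines b 0 := by
        have := hfind 0 (by simp only [List.findIdx?_cons, hp, if_true])
        simpa using this
      have hb : b < lines.length := by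
        have := List.length_drop (l := lines) (i := b)
        rw [hdrop] at this; simp at this; omega
      have hlock : pvScanB b none (cur :: rest) = pvScanB b (some 0) (cur :: rest) := by
        simp only [pvScanB, hp, if_true]
      have hA : pvOuterA lines b (cur :: rest) = pvInnerA lines b 0 pvLicLines := by
        simp only [pvOuterA, hp, if_true]
      rw [hlock, hA]
      have := pvLocked lines b 4 0 (by omega) (by omega) hH0
      rw [Nat.add_zero] at this
      rw [hdrop] at this
      simpa [pvLicLines] using this
    · -- keep searching
      simp only [Bool.not_eq_true] at hp
      have hB : pvScanB b none (cur :: rest) = pvScanB (b + 1) none rest := by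
        have hp' : PySem.Chars.isIn pvL0.toList cur.toList = false := by simpa using hp
        simp [pvScanB, hp']
      have hA : pvOuterA lines b (cur :: rest) = pvOuterA lines (b + 1) rest := by
        simp only [pvOuterA, hp]
        simp
      rw [hB, hA]
      refine ih (b + 1) ?_ ?_
      · rw [← List.drop_drop, hdrop]; simp
      · intro j hj
        have : (cur :: rest).findIdx? (fun s => PySem.Str.isIn pvL0 s) = some (j + 1) := by
          simp only [List.findIdx?_cons, hp, hj, Option.map_some, Bool.false_eq_true, if_false]
        have := hfind (j + 1) this
        rw [show b + (j + 1) = b + 1 + j by omega] at this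
        exact this

-- Pre_ gives the good-block hypothesis at the first match in lines
theorem pvPre_imp (lines : List String) (h : Pre_valid_license lines) :
    ∀ j, lines.findIdx? (fun s => PySem.Str.isIn pvL0 s) = some j → pvH lines j 0 := by
  intro j hj
  unfold Pre_valid_license at h
  rw [hj] at h
  rcases Bool.or_eq_true_iff.mp h with h1 | h2
  · exact Or.inl (by simpa using h1)
  · rcases List.any_eq_true.mp h2 with ⟨l, hl, hcond⟩
    rcases Bool.and_eq_true_iff.mp hcond with ⟨hlt, hmis⟩
    refine Or.inr ⟨l, by omega, by simpa using List.mem_range.mp hl, by simpa using hlt, ?_⟩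
    simpa using hmis

-- ===== VERDICT (by name: the statement is the Claim_ definition above) =====
theorem valid_license_spec : Claim_equal_valid_license := by
  intro lines _ hpre
  unfold Spec_valid_license valid_license valid_license_alt
  exact (pvUnlocked lines lines 0 (by simp) (fun j hj => by
    simpa using pvPre_imp lines hpre j hj)).symm
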